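-- pv_equiv track=rewrite | github.com/John1400800/stuff | python_learning/les07_PyQt5_errors/check_phone_num.py | staples
-- ===== SOURCE A (Python) =====
-- def staples(s: str):
--     """Проверяет правельность постановки скобок"""
--
--     cnt = 0
--     for i in s:
--         if i == '(':
--             cnt += 1
--         elif i == ')':
--             cnt -= 1
--         if cnt == -1 or cnt == 2:
--             return False
--     if cnt == 0:
--         return True
--     return False
-- ===== SOURCE B (Python) =====
-- def staples(s: str):
--     """Проверяет правельность постановки скобок"""
--     t = ''.join(c for c in s if c in '()')
--     return t == '()' * (len(t) // 2)
-- ===== Notes on version B (the rewrite author's own statement) =====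
-- stated objective: simpler
-- what changed: Instead of tracking a running balance counter with early returns, B extracts the bracket characters and compares them to the canonical alternating open-close pattern of the right length, exploiting that A accepts exactly the depth-at-most-one balanced strings.
import Mathlib
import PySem

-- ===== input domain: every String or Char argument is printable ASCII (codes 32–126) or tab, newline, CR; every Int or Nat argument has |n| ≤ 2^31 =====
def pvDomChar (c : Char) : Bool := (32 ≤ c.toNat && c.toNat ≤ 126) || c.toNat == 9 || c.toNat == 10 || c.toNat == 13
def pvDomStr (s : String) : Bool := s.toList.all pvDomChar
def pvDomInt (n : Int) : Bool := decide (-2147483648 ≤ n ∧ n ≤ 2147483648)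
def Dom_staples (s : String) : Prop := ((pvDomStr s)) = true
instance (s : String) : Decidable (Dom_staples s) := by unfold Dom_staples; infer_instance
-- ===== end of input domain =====

-- B drops A's running balance counter: it extracts the bracket characters and compares them with the canonical alternating open-close pattern of the right length (simpler decomposition, same asymptotic cost).


-- ===== PORT A =====
-- A's for-loop with early 'return False', transliterated as structural recursion over the characters with the counter as state
def staplesLoop : List Char → Int → Bool
  | [], cnt => cnt == 0
  | i :: rest, cnt =>
    let cnt' := if i = '(' then cnt + 1 else if i = ')' then cnt - 1 else cnt
    if cnt' = -1 ∨ cnt' = 2 then false else staplesLoop rest cnt'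

def staples (s : String) : Bool := staplesLoop s.toList 0

-- ===== PORT B =====
-- B: join the filtered bracket characters, then compare with the repeated open-close pair
def staples_alt (s : String) : Bool :=
  let t := s.toList.filter (fun c => c == '(' || c == ')')
  t == List.flatten (List.replicate (t.length / 2) ['(', ')'])

-- ===== PRECONDITION & SPEC =====
def Spec_staples (s : String) (out : Bool) : Prop := out = staples_alt s
instance (s : String) (out : Bool) : Decidable (Spec_staples s out) := by unfold Spec_staples; infer_instance

-- ===== CLAIM (what is proved, stated in full; the proofs are below) =====
def Claim_equal_staples : Prop := ∀ (s : String), Dom_staples s → Spec_staples s (staples s)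

-- ===== LEMMAS AND PROOFS =====
-- canonical pattern "()"*k
def stPat (k : Nat) : List Char := List.flatten (List.replicate k ['(', ')'])

-- proof-layer automaton: alt false t ⇔ t is "()"*k ; alt true t ⇔ t is ")"++"()"*k
def stAlt : Bool → List Char → Bool
  | false, [] => true
  | true, [] => false
  | false, c :: t => if c = '(' then stAlt true t else false
  | true, c :: t => if c = ')' then stAlt false t else false

lemma stPat_succ (k : Nat) : stPat (k + 1) = '(' :: ')' :: stPat k := by
  simp [stPat, List.replicate_succ]

lemma stPat_length (k : Nat) : (stPat k).length = 2 * k := by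
  induction k with
  | zero => simp [stPat]
  | succ k ih => rw [stPat_succ]; simp [ih]; omega

lemma loop_alt (cs : List Char) :
    (staplesLoop cs 0 = stAlt false (cs.filter (fun c => c == '(' || c == ')'))) ∧
    (staplesLoop cs 1 = stAlt true (cs.filter (fun c => c == '(' || c == ')'))) := by
  induction cs with
  | nil => simp [staplesLoop, stAlt]
  | cons i rest ih =>
    by_cases h1 : i = '('
    · subst h1
      refine ⟨?_, ?_⟩ <;> simp [staplesLoop, stAlt, ih.2]
    · by_cases h2 : i = ')'
      · subst h2
        refine ⟨?_, ?_⟩ <;> simp [staplesLoop, stAlt, ih.1]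
      · refine ⟨?_, ?_⟩ <;> simp [staplesLoop, h1, h2, ih.1, ih.2]

lemma alt_iff (t : List Char) :
    (stAlt false t = true ↔ ∃ k, t = stPat k) ∧
    (stAlt true t = true ↔ ∃ k, t = ')' :: stPat k) := by
  induction t with
  | nil =>
    constructor
    · simp [stAlt]; exact ⟨0, by simp [stPat]⟩
    · simp [stAlt]
  | cons c t ih =>
    constructor
    · by_cases h : c = '('
      · subst h
        rw [show stAlt false ('(' :: t) = stAlt true t from by simp [stAlt], ih.2]
        constructor
        · rintro ⟨k, rfl⟩; exact ⟨k + 1, by rw [stPat_succ]⟩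
        · rintro ⟨k, hk⟩
          cases k with
          | zero => simp [stPat] at hk
          | succ k => rw [stPat_succ] at hk; cases hk; exact ⟨k, rfl⟩
      · rw [show stAlt false (c :: t) = false from by simp [stAlt, h]]
        simp only [Bool.false_eq_true, false_iff]
        rintro ⟨k, hk⟩
        cases k with
        | zero => simp [stPat] at hk
        | succ k => rw [stPat_succ] at hk; injection hk with h' _; exact h h'
    · by_cases h : c = ')'
      · subst h
        rw [show stAlt true (')' :: t) = stAlt false t from by simp [stAlt], ih.1]
        constructor
        · rintro ⟨k, rfl⟩; exact ⟨k, rfl⟩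
        · rintro ⟨k, hk⟩; exact ⟨k, by injection hk⟩
      · rw [show stAlt true (c :: t) = false from by simp [stAlt, h]]
        simp only [Bool.false_eq_true, false_iff]
        rintro ⟨k, hk⟩
        injection hk with h' _; exact h h'

lemma pat_check_iff (t : List Char) :
    ((t == stPat (t.length / 2)) = true) ↔ ∃ k, t = stPat k := by
  constructor
  · intro h; exact ⟨t.length / 2, by exact_mod_cast eq_of_beq h⟩
  · rintro ⟨k, rfl⟩
    rw [stPat_length]
    simp

theorem staples_eq (s : String) : staples s = staples_alt s := by
  unfold staples staples_alt
  rw [Bool.eq_iff_iff, (loop_alt s.toList).1]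
  show _ ↔ (_ == stPat _) = true
  rw [(alt_iff _).1, pat_check_iff]

-- ===== VERDICT (by name: the statement is the Claim_ definition above) =====
theorem staples_spec : Claim_equal_staples := by
  intro s _
  unfold Spec_staples
  exact staples_eq s
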